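-- pv_equiv track=rewrite | github.com/evrardco/advent-2019 | day_4/day_4_2.py | has_two_adj_streak
-- ===== SOURCE A (Python) =====
-- def has_two_adj_streak(number):
--     n = str(number)
--     c0 = None
--     streak = 0
--     for c1 in n:
--         if c0 == c1:
--             streak = streak + 1
--         else:
--             if streak == 1:
--                 return True
--             streak = 0
--             c0 = c1
--     return streak == 1
-- ===== SOURCE B (Python) =====
-- def _runs(c, k, s):
--     # run-length encoding: lengths of maximal runs, current run is k copies of c
--     if not s:
--         return [k]
--     if s[0] == c:
--         return _runs(c, k + 1, s[1:])
--     return [k] + _runs(s[0], 1, s[1:])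
--
-- def has_two_adj_streak(number):
--     s = str(number)
--     runs = _runs(s[0], 1, s[1:])  # str(int) is never empty
--     return any(r == 2 for r in runs)
-- ===== Notes on version B (the rewrite author's own statement) =====
-- stated objective: alternative
-- what changed: Replaces the streak counter with early return by a run-length encoding of the digit string followed by a check whether any maximal run has length exactly 2.
import Mathlib
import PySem

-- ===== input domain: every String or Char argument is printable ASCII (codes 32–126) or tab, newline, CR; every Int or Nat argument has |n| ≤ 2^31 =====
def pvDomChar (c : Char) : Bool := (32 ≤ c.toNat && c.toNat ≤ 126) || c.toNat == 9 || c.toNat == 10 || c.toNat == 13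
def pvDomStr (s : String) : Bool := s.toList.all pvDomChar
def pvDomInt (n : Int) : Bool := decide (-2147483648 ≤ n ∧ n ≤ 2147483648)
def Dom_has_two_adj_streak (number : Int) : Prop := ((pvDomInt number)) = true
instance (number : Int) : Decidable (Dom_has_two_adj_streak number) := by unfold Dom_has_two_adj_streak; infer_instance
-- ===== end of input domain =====

-- B replaces A's streak counter + early return by a run-length encoding of str(number)
-- followed by a check whether any maximal run has length exactly 2 (alternative decomposition).


-- ===== PORT A =====
-- A's for-loop with early return, state (c0, streak)
def pvLoopA : Option Char → Int → List Char → Bool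
  | _, streak, [] => streak == 1
  | c0, streak, c1 :: rest =>
    if c0 == some c1 then pvLoopA c0 (streak + 1) rest
    else if streak == 1 then true
    else pvLoopA (some c1) 0 rest

def has_two_adj_streak (number : Int) : Bool :=
  pvLoopA none 0 (PySem.Int.toStr number).toList

-- ===== PORT B =====
-- Source B's _runs: lengths of the maximal runs, current run = k copies of c
def pvRuns : Char → Nat → List Char → List Nat
  | _, k, [] => [k]
  | c, k, x :: xs => if x == c then pvRuns c (k + 1) xs else k :: pvRuns x 1 xs

def has_two_adj_streak_alt (number : Int) : Bool :=
  match (PySem.Int.toStr number).toList with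
  | [] => false          -- unreachable: str(int) is never empty (Source B indexes s[0])
  | c :: rest => (pvRuns c 1 rest).any (· == 2)

-- ===== PRECONDITION & SPEC =====
def Spec_has_two_adj_streak (number : Int) (out : Bool) : Prop := out = has_two_adj_streak_alt number
instance (number : Int) (out : Bool) : Decidable (Spec_has_two_adj_streak number out) := by unfold Spec_has_two_adj_streak; infer_instance

-- ===== CLAIM (what is proved, stated in full; the proofs are below) =====
def Claim_equal_has_two_adj_streak : Prop := ∀ (number : Int), Dom_has_two_adj_streak number → Spec_has_two_adj_streak number (has_two_adj_streak number)

-- ===== LEMMAS AND PROOFS =====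
-- A's loop state (some c, k-1) corresponds to being inside a run of k copies of c.
theorem pvLoopA_eq_runs (l : List Char) : ∀ (c : Char) (k : Nat),
    pvLoopA (some c) ((k : Int) - 1) l = (pvRuns c k l).any (· == 2) := by
  induction l with
  | nil =>
      intro c k
      simp [pvLoopA, pvRuns, List.any]
      omega
  | cons x xs ih =>
      intro c k
      rw [pvLoopA.eq_2, pvRuns.eq_2]
      by_cases h : x = c
      · subst h
        have e : (k : Int) - 1 + 1 = ((k + 1 : Nat) : Int) - 1 := by push_cast; ring
        simp only [BEq.rfl, if_true, e, ih]
      · have hb : (some c == some x) = false := by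
          simp only [beq_eq_false_iff_ne]
          exact fun e => h (Option.some.inj e).symm
        have hb' : (x == c) = false := by simp [h]
        rw [hb, hb', if_neg (by simp)]
        by_cases hk : k = 2
        · subst hk
          rw [if_pos (by norm_num)]
          simp
        · have hs : (((k : Int) - 1) == 1) = false := by
            simp only [beq_eq_false_iff_ne]; omega
          rw [hs, if_neg (by simp)]
          have e0 : (0 : Int) = ((1 : Nat) : Int) - 1 := by norm_num
          rw [e0, ih]
          simp [hk]

-- ===== VERDICT (by name: the statement is the Claim_ definition above) =====
theorem has_two_adj_streak_spec : Claim_equal_has_two_adj_streak := by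
  intro number _
  unfold Spec_has_two_adj_streak has_two_adj_streak has_two_adj_streak_alt
  cases h : (PySem.Int.toStr number).toList with
  | nil => rw [pvLoopA.eq_1]; rfl
  | cons c rest =>
      rw [pvLoopA.eq_2, if_neg (by simp), if_neg (by norm_num)]
      have e0 : (0 : Int) = ((1 : Nat) : Int) - 1 := by norm_num
      rw [e0, pvLoopA_eq_runs]
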